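-- pv_equiv track=rewrite | github.com/Rest011/Encrypter | Encrypter.py | encrypt_m2
-- ===== SOURCE A (Python) =====
-- def encrypt_m2(n, abc):
--     standart_abc = ['1', '2', '3', '4', '5', '6', '7', '8', '9', '0']
--     n = massiver(n)
--     for i in range(len(n)):
--         for j in range(0, 10):
--             if n[i] == standart_abc[j]:
--                 n[i] = abc[j]
--                 break
--     return n
--
-- def massiver(n):
--     n = str(n)
--     m = []
--     for i in range(len(n)):
--         m += n[i]
--     return m
-- ===== SOURCE B (Python) =====
-- def encrypt_m2(n, abc):
--     # Arithmetic digit extraction: never converts n to a string. Digits are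
--     # peeled off with divmod from the least significant end and substituted
--     # back-to-front; digit d corresponds to substitution slot (d - 1) % 10
--     # (A's alphabet is '1'..'9','0').
--     if n == 0:
--         return [abc[9]]
--     out = []
--     m = abs(n)
--     while m:
--         m, d = divmod(m, 10)
--         out.append(abc[(d - 1) % 10])
--     if n < 0:
--         out.append('-')
--     out.reverse()
--     return out
-- ===== Notes on version B (the rewrite author's own statement) =====
-- stated objective: alternative
-- what changed: B never builds or scans a string at all: it extracts the decimal digits of |n| arithmetically with divmod, substitutes each via abc[(d-1)%10] least-significant first, appends '-' for negative n and reverses, whereas A materialises str(n) as a char list and rewrites it in place with an inner linear scan over the ten-element substitution alphabet.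
-- outside the precondition, e.g. on encrypt_m2(12, ['a']): A raises IndexError, B raises IndexError
import Mathlib
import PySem

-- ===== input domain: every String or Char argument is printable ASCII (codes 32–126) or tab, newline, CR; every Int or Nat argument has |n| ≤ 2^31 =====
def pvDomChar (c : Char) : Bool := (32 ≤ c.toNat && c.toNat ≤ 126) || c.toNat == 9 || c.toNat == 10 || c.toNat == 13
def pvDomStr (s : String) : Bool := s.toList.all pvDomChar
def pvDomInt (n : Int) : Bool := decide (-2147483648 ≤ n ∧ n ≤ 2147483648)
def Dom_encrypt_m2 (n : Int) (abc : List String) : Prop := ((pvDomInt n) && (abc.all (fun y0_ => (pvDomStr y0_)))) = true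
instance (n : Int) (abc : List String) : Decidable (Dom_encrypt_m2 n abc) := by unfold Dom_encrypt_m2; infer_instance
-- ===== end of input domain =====

-- B never converts n to a string at all: it peels the decimal digits off |n| arithmetically
-- with divmod, substitutes each back-to-front, and reverses (alternative decomposition;
-- A materialises str(n) as a char list and rewrites it in place with an inner search loop).

-- ===== PORT A =====
-- standart_abc
def pvStdAbc : List String := ["1", "2", "3", "4", "5", "6", "7", "8", "9", "0"]

-- massiver: n = str(n); m = []; for i in range(len(n)): m += n[i]; return m
def pvMassiver (n : Int) : List String :=
  (List.range (PySem.Int.toChars n).length).foldl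
    (fun m i => m ++ [String.ofList [(PySem.Int.toChars n).getD i ' ']]) []

-- the inner 'for j in range(0, 10): if n[i] == standart_abc[j]: n[i] = abc[j]; break'
-- (abc[j] is pyGetD: the IndexError inputs are excluded by Pre_encrypt_m2)
def pvInnerA (js : List Nat) (x : String) (abc : List String) : String :=
  match js with
  | [] => x
  | j :: rest =>
      if x == pvStdAbc.getD j "" then PySem.List.pyGetD abc (j : Int) ""
      else pvInnerA rest x abc

def encrypt_m2 (n : Int) (abc : List String) : List String :=
  (List.range (pvMassiver n).length).foldl
    (fun cur i => cur.set i (pvInnerA (List.range 10) (cur.getD i "") abc)) (pvMassiver n)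

-- ===== PORT B =====
-- while m: m, d = divmod(m, 10); out.append(abc[(d - 1) % 10])
-- (abc[...] is pyGetD; the IndexError inputs are excluded by Pre_encrypt_m2)
def pvDigitsB (m : Nat) (abc : List String) (out : List String) : List String :=
  if h : m = 0 then out
  else pvDigitsB (m / 10) abc
        (out ++ [PySem.List.pyGetD abc (PySem.Int.mod (((m % 10 : Nat) : Int) - 1) 10) ""])
termination_by m
decreasing_by exact Nat.div_lt_self (Nat.pos_of_ne_zero h) (by norm_num)

-- if n == 0: return [abc[9]]; out = digits loop on abs(n); append '-' if n < 0; reverse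
def encrypt_m2_alt (n : Int) (abc : List String) : List String :=
  if n = 0 then [PySem.List.pyGetD abc 9 ""]
  else if n < 0 then (pvDigitsB n.natAbs abc [] ++ ["-"]).reverse
  else (pvDigitsB n.natAbs abc []).reverse

-- ===== PRECONDITION & SPEC =====
-- Pre_ excludes exactly the inputs on which the Python A raises IndexError: some digit of
-- str(n) whose substitution index is not a valid index into abc (Python B raises there too).
def Pre_encrypt_m2 (n : Int) (abc : List String) : Prop :=
  ((PySem.Int.toChars n).all
    (fun c => !c.isDigit || decide ((c.toNat - 48 + 9) % 10 < abc.length))) = true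
instance (n : Int) (abc : List String) : Decidable (Pre_encrypt_m2 n abc) := by
  unfold Pre_encrypt_m2; infer_instance

def pvWitness_encrypt_m2 : Int × List String :=
  (-120, ["a", "b", "c", "d", "e", "f", "g", "h", "i", "j"])

def Spec_encrypt_m2 (n : Int) (abc : List String) (out : List String) : Prop := out = encrypt_m2_alt n abc
instance (n : Int) (abc : List String) (out : List String) : Decidable (Spec_encrypt_m2 n abc out) := by unfold Spec_encrypt_m2; infer_instance

-- ===== CLAIM (what is proved, stated in full; the proofs are below) =====
def Claim_equal_encrypt_m2 : Prop := ∀ (n : Int) (abc : List String), Dom_encrypt_m2 n abc → Pre_encrypt_m2 n abc → Spec_encrypt_m2 n abc (encrypt_m2 n abc)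

-- ===== LEMMAS AND PROOFS =====

-- the per-character substitution A's inner scan computes (proof-side abbreviation)
def pvSubst (abc : List String) (c : Char) : String :=
  if "0123456789".toList.contains c then
    PySem.List.pyGetD abc (PySem.Int.mod ((c.toNat : Int) - 48 - 1) 10) ""
  else String.ofList [c]

-- the per-digit substitution B computes
def pvSubstD (abc : List String) (d : Nat) : String :=
  PySem.List.pyGetD abc (PySem.Int.mod ((d : Int) - 1) 10) ""

theorem pv_ofList_single_inj (c d : Char) :
    String.ofList [c] = String.ofList [d] ↔ c = d := by
  constructor
  · intro h; have := congrArg String.toList h; simpa using this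
  · rintro rfl; rfl

theorem pv_lit1 : ("1":String) = String.ofList ['1'] := rfl
theorem pv_lit2 : ("2":String) = String.ofList ['2'] := rfl
theorem pv_lit3 : ("3":String) = String.ofList ['3'] := rfl
theorem pv_lit4 : ("4":String) = String.ofList ['4'] := rfl
theorem pv_lit5 : ("5":String) = String.ofList ['5'] := rfl
theorem pv_lit6 : ("6":String) = String.ofList ['6'] := rfl
theorem pv_lit7 : ("7":String) = String.ofList ['7'] := rfl
theorem pv_lit8 : ("8":String) = String.ofList ['8'] := rfl
theorem pv_lit9 : ("9":String) = String.ofList ['9'] := rfl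
theorem pv_lit0 : ("0":String) = String.ofList ['0'] := rfl

-- A's inner scan over standart_abc, evaluated on a one-character string, is pvSubst.
theorem pv_inner_eq (c : Char) (abc : List String) :
    pvInnerA (List.range 10) (String.ofList [c]) abc = pvSubst abc c := by
  have hr : List.range 10 = [0,1,2,3,4,5,6,7,8,9] := by decide
  have hs : "0123456789".toList = ['0','1','2','3','4','5','6','7','8','9'] := by decide
  by_cases hc : c ∈ ['0','1','2','3','4','5','6','7','8','9']
  · fin_cases hc <;>
      (rw [hr]
       simp [pvInnerA, pvSubst, pvStdAbc, pv_lit1, pv_lit2, pv_lit3, pv_lit4, pv_lit5,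
         pv_lit6, pv_lit7, pv_lit8, pv_lit9, pv_lit0, hs])
  · simp only [List.mem_cons, List.not_mem_nil, or_false] at hc
    push Not at hc
    obtain ⟨h0, h1, h2, h3, h4, h5, h6, h7, h8, h9⟩ := hc
    rw [hr]
    have n0 : String.ofList [c] ≠ "0" := by rw [pv_lit0]; exact fun h => h0 ((pv_ofList_single_inj c '0').mp h)
    have n1 : String.ofList [c] ≠ "1" := by rw [pv_lit1]; exact fun h => h1 ((pv_ofList_single_inj c '1').mp h)
    have n2 : String.ofList [c] ≠ "2" := by rw [pv_lit2]; exact fun h => h2 ((pv_ofList_single_inj c '2').mp h)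
    have n3 : String.ofList [c] ≠ "3" := by rw [pv_lit3]; exact fun h => h3 ((pv_ofList_single_inj c '3').mp h)
    have n4 : String.ofList [c] ≠ "4" := by rw [pv_lit4]; exact fun h => h4 ((pv_ofList_single_inj c '4').mp h)
    have n5 : String.ofList [c] ≠ "5" := by rw [pv_lit5]; exact fun h => h5 ((pv_ofList_single_inj c '5').mp h)
    have n6 : String.ofList [c] ≠ "6" := by rw [pv_lit6]; exact fun h => h6 ((pv_ofList_single_inj c '6').mp h)
    have n7 : String.ofList [c] ≠ "7" := by rw [pv_lit7]; exact fun h => h7 ((pv_ofList_single_inj c '7').mp h)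
    have n8 : String.ofList [c] ≠ "8" := by rw [pv_lit8]; exact fun h => h8 ((pv_ofList_single_inj c '8').mp h)
    have n9 : String.ofList [c] ≠ "9" := by rw [pv_lit9]; exact fun h => h9 ((pv_ofList_single_inj c '9').mp h)
    simp [pvInnerA, pvSubst, pvStdAbc, hs, h0, h1, h2, h3, h4, h5, h6, h7, h8, h9,
      n0, n1, n2, n3, n4, n5, n6, n7, n8, n9]

-- A's outer loop: setting index i from the current value at index i, for i = 0,…,k-1,
-- rewrites the first k entries by g and leaves the rest untouched.
theorem pv_foldl_set (g : String → String) :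
    ∀ (k : Nat) (m : List String), k ≤ m.length →
      (List.range k).foldl (fun cur i => cur.set i (g (cur.getD i ""))) m
        = (m.take k).map g ++ m.drop k := by
  intro k
  induction k with
  | zero => intro m _; simp
  | succ k ih =>
      intro m hk
      rw [List.range_succ, List.foldl_append]
      rw [ih m (Nat.le_of_succ_le hk)]
      have hklt : k < m.length := hk
      have hlen : ((m.take k).map g).length = k := by
        simp [Nat.min_eq_left (Nat.le_of_lt hklt)]
      have hdrop : m.drop k = m[k] :: m.drop (k + 1) :=
        List.drop_eq_getElem_cons hklt
      simp only [List.foldl_cons, List.foldl_nil]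
      rw [hdrop]
      have hget : ((m.take k).map g ++ m[k] :: m.drop (k + 1)).getD k "" = m[k] := by
        rw [List.getD_eq_getElem?_getD, List.getElem?_append_right (by omega), hlen]
        simp [List.getElem?_eq_getElem hklt]
      rw [hget]
      rw [List.set_append, hlen]
      rw [if_neg (lt_irrefl k), Nat.sub_self, List.set_cons_zero]
      rw [List.take_add_one, List.getElem?_eq_getElem hklt]
      simp only [Option.toList_some, List.map_append, List.map_cons, List.map_nil,
        List.append_assoc, List.singleton_append]

theorem pv_massiver_eq (n : Int) :
    pvMassiver n = (PySem.Int.toChars n).map (fun c => String.ofList [c]) := by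
  unfold pvMassiver
  rw [PySem.List.foldl_append_singleton_eq_map]
  apply List.ext_getElem
  · simp
  · intro i h1 h2
    have h1' : i < (PySem.Int.toChars n).length := by simpa using h1
    simp only [List.nil_append, List.getElem_map, List.getElem_range]
    rw [List.getD_eq_getElem?_getD, List.getElem?_eq_getElem h1']
    rfl

-- A is the per-character substitution mapped over str(n)
theorem pv_A_eq_map (n : Int) (abc : List String) :
    encrypt_m2 n abc = (PySem.Int.toChars n).map (pvSubst abc) := by
  unfold encrypt_m2
  rw [pv_massiver_eq]
  rw [pv_foldl_set (fun x => pvInnerA (List.range 10) x abc) _ _ (le_refl _)]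
  rw [List.take_of_length_le (by simp), List.drop_of_length_le (by simp), List.append_nil]
  rw [List.map_map]
  exact List.map_congr_left (fun c _ => pv_inner_eq c abc)

-- the fuelled core printer, with enough fuel, is the reversed digit list
theorem pv_toDigitsCore_eq (m : Nat) (hm : 0 < m) :
    ∀ (f : Nat) (acc : List Char), m ≤ f →
      Nat.toDigitsCore 10 f m acc
        = ((Nat.digits 10 m).map Nat.digitChar).reverse ++ acc := by
  induction m using Nat.strong_induction_on with
  | _ m ih =>
    intro f acc hf
    match f with
    | 0 => omega
    | f + 1 =>
      simp only [Nat.toDigitsCore]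
      rw [Nat.digits_def' (by norm_num : 1 < 10) hm]
      by_cases h10 : m / 10 = 0
      · simp [h10]
      · rw [if_neg h10]
        have hlt : m / 10 < m := Nat.div_lt_self hm (by norm_num)
        rw [ih (m / 10) hlt (Nat.pos_of_ne_zero h10) f _ (by omega)]
        simp

-- B's divmod loop appends the substituted digits, least significant first
theorem pv_digitsB_eq (abc : List String) :
    ∀ (m : Nat) (out : List String),
      pvDigitsB m abc out = out ++ (Nat.digits 10 m).map (pvSubstD abc) := by
  intro m
  induction m using Nat.strong_induction_on with
  | _ m ih =>
    intro out
    rw [pvDigitsB]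
    by_cases h : m = 0
    · simp [h]
    · rw [dif_neg h]
      have hlt : m / 10 < m := Nat.div_lt_self (Nat.pos_of_ne_zero h) (by norm_num)
      rw [ih (m / 10) hlt]
      rw [Nat.digits_def' (by norm_num : 1 < 10) (Nat.pos_of_ne_zero h)]
      simp [pvSubstD]

-- the per-character and per-digit substitutions agree on decimal digits
theorem pv_subst_digitChar (abc : List String) (d : Nat) (hd : d < 10) :
    pvSubst abc (Nat.digitChar d) = pvSubstD abc d := by
  interval_cases d <;> simp [pvSubst, pvSubstD] <;> rfl

theorem pv_map_subst_toDigits (abc : List String) (m : Nat) (hm : 0 < m) :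
    (Nat.toDigits 10 m).map (pvSubst abc)
      = ((Nat.digits 10 m).map (pvSubstD abc)).reverse := by
  unfold Nat.toDigits
  rw [pv_toDigitsCore_eq m hm (m + 1) [] (by omega)]
  rw [List.append_nil, List.map_reverse, List.map_map]
  congr 1
  exact List.map_congr_left (fun d hd => pv_subst_digitChar abc d (Nat.digits_lt_base (by norm_num) hd))

-- ===== VERDICT (by name: the statement is the Claim_ definition above) =====
theorem encrypt_m2_spec : Claim_equal_encrypt_m2 := by
  intro n abc _ _
  unfold Spec_encrypt_m2
  rw [pv_A_eq_map]
  unfold encrypt_m2_alt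
  by_cases h0 : n = 0
  · subst h0
    rw [if_pos rfl, show PySem.Int.toChars 0 = ['0'] from by decide]
    rw [List.map_cons, List.map_nil]
    rw [show pvSubst abc '0' = PySem.List.pyGetD abc 9 "" from by
      simp [pvSubst]]
  · rw [if_neg h0]
    unfold PySem.Int.toChars
    by_cases hneg : n < 0
    · rw [if_pos hneg, if_pos hneg]
      have hpos : 0 < n.natAbs := Int.natAbs_pos.mpr h0
      rw [List.map_cons, pv_map_subst_toDigits abc n.natAbs hpos]
      rw [pv_digitsB_eq abc n.natAbs [], List.nil_append]
      rw [show pvSubst abc '-' = "-" from by simp [pvSubst]]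
      rw [List.reverse_append]
      rfl
    · rw [if_neg hneg, if_neg hneg]
      have htoNat : n.toNat = n.natAbs := by omega
      have hpos : 0 < n.natAbs := Int.natAbs_pos.mpr h0
      rw [htoNat, pv_map_subst_toDigits abc n.natAbs hpos]
      rw [pv_digitsB_eq abc n.natAbs [], List.nil_append]
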